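-- pv_equiv track=rewrite | github.com/odifmonster/js-interpreter | src/generators/gengram.py | format_nonterm
-- ===== SOURCE A (Python) =====
-- def parse_rule(rule: str) -> list[tuple[str, str | list[str]]]:
--     parsed: list[tuple[str, str | list[str]]] = []
--
--     in_grp = False
--     cur_group: list[str] = []
--
--     for item in rule.split():
--         if item == "(" or item == "[":
--             in_grp = True
--         elif item == ")" or item == "]":
--             grp_kind = "opt" if item == ")" else "star"
--             in_grp = False
--             parsed.append((grp_kind, cur_group))
--             cur_group = []
--         elif in_grp:
--             cur_group.append(item)
--         else:
--             parsed.append(("symbol", item))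
--
--     return parsed
--
-- def format_nonterm(rule: str, act: str, depth: int) -> str:
--     parsed = parse_rule(rule)
--
--     rule_str = " "*(depth*2) + "{\n" + "  "*(depth+1) + "rule: [\n"
--     for kind, value in parsed:
--         if kind == "symbol":
--             rule_str = rule_str + "  "*(depth+2) + f"\"{value}\",\n"
--         else:
--             rule_str = rule_str + "  "*(depth+2) + "{\n"
--             rule_str = rule_str + "  "*(depth+3)
--             rule_str = rule_str + f"kind: \"{kind}\",\n"
--             rule_str = rule_str + "  "*(depth+3) + "symbols: "
--             rule_str = rule_str + "[" + ", ".join([f"\"{x}\"" for x in value]) + "]\n"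
--             rule_str = rule_str + "  "*(depth+2) + "},\n"
--     rule_str = rule_str + "  "*(depth+1) + "],\n"
--     rule_str = rule_str + "  "*(depth+1) + f"action: {act}\n" + "  "*depth + "}"
--
--     return rule_str
-- ===== SOURCE B (Python) =====
-- def format_nonterm(rule: str, act: str, depth: int) -> str:
--     i1 = "  " * (depth + 1)
--     i2 = "  " * (depth + 2)
--     i3 = "  " * (depth + 3)
--     frags = [" " * (depth * 2) + "{\n" + i1 + "rule: [\n"]
--     in_grp = False
--     buf = []
--     for item in rule.split():
--         if item == "(" or item == "[":
--             in_grp = True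
--         elif item == ")" or item == "]":
--             in_grp = False
--             kind = "opt" if item == ")" else "star"
--             frags.append(i2 + "{\n"
--                          + i3 + "kind: \"" + kind + "\",\n"
--                          + i3 + "symbols: [" + ", ".join("\"" + x + "\"" for x in buf) + "]\n"
--                          + i2 + "},\n")
--             buf = []
--         elif in_grp:
--             buf.append(item)
--         else:
--             frags.append(i2 + "\"" + item + "\",\n")
--     frags.append(i1 + "],\n" + i1 + "action: " + act + "\n" + "  " * depth + "}")
--     return "".join(frags)
-- ===== Notes on version B (the rewrite author's own statement) =====
-- stated objective: alternative
-- what changed: B fuses parse_rule into the formatting pass: a single loop over rule.split() that emits the formatted fragments directly (joining them once at the end), instead of first building an intermediate list of (kind, value) tuples and then formatting it in a second loop; the per-level indent strings are computed once instead of on every token.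
import Mathlib
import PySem

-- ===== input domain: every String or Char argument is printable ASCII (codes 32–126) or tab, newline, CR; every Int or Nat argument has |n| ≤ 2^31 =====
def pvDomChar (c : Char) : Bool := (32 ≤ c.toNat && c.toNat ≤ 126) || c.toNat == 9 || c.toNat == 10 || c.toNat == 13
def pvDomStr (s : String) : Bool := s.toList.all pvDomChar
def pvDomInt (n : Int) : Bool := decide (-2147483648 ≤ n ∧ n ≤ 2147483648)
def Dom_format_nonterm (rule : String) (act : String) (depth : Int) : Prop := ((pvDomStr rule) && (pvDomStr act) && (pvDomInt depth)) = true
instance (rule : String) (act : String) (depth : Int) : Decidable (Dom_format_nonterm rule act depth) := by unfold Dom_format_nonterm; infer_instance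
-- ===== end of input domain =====

-- B fuses parse_rule into the formatting pass: one traversal of the tokens emitting
-- string fragments directly (no intermediate parsed tuple list); objective: simpler/alternative.


-- Python's s * n on strings (empty for n ≤ 0); exact
def strRep (s : String) (n : Int) : String := String.ofList (PySem.List.pyRepeat s.toList n)

-- ===== PORT A =====
-- parse_rule's entries: ("symbol", str) or (kind, list[str])
inductive PEntry where
  | symbol : String → PEntry
  | group : String → List String → PEntry
deriving DecidableEq, Repr

-- the for-loop of parse_rule, state (parsed, in_grp, cur_group)
def parseRuleLoop (items : List String) (parsed : List PEntry) (in_grp : Bool) (cur : List String) : List PEntry :=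
  match items with
  | [] => parsed
  | item :: rest =>
    if item == "(" || item == "[" then parseRuleLoop rest parsed true cur
    else if item == ")" || item == "]" then
      parseRuleLoop rest (parsed ++ [PEntry.group (if item == ")" then "opt" else "star") cur]) false []
    else if in_grp then parseRuleLoop rest parsed in_grp (cur ++ [item])
    else parseRuleLoop rest (parsed ++ [PEntry.symbol item]) in_grp cur

def parse_rule (rule : String) : List PEntry := parseRuleLoop (PySem.Str.split₀ rule) [] false []

-- the for-loop of format_nonterm, accumulating rule_str
def fmtLoop (parsed : List PEntry) (depth : Int) (rule_str : String) : String :=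
  match parsed with
  | [] => rule_str
  | PEntry.symbol v :: rest =>
      fmtLoop rest depth (rule_str ++ strRep "  " (depth+2) ++ "\"" ++ v ++ "\",\n")
  | PEntry.group kind value :: rest =>
      fmtLoop rest depth (rule_str ++ strRep "  " (depth+2) ++ "{\n" ++ strRep "  " (depth+3)
        ++ "kind: \"" ++ kind ++ "\",\n" ++ strRep "  " (depth+3) ++ "symbols: "
        ++ "[" ++ PySem.Str.join ", " (value.map (fun x => "\"" ++ x ++ "\"")) ++ "]\n"
        ++ strRep "  " (depth+2) ++ "},\n")

def format_nonterm (rule : String) (act : String) (depth : Int) : String :=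
  let parsed := parse_rule rule
  let rule_str := strRep " " (depth*2) ++ "{\n" ++ strRep "  " (depth+1) ++ "rule: [\n"
  let rule_str := fmtLoop parsed depth rule_str
  let rule_str := rule_str ++ strRep "  " (depth+1) ++ "],\n"
  rule_str ++ strRep "  " (depth+1) ++ "action: " ++ act ++ "\n" ++ strRep "  " depth ++ "}"

-- ===== PORT B =====
-- B's single pass over the tokens: state (in_grp, buf, frags)
def bLoop (items : List String) (i2 i3 : String) (in_grp : Bool) (buf : List String) (frags : List String) : List String :=
  match items with
  | [] => frags
  | item :: rest =>
    if item == "(" || item == "[" then bLoop rest i2 i3 true buf frags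
    else if item == ")" || item == "]" then
      let kind := if item == ")" then "opt" else "star"
      bLoop rest i2 i3 false []
        (frags ++ [i2 ++ "{\n" ++ i3 ++ "kind: \"" ++ kind ++ "\",\n"
                   ++ i3 ++ "symbols: [" ++ PySem.Str.join ", " (buf.map (fun x => "\"" ++ x ++ "\"")) ++ "]\n"
                   ++ i2 ++ "},\n"])
    else if in_grp then bLoop rest i2 i3 in_grp (buf ++ [item]) frags
    else bLoop rest i2 i3 in_grp buf (frags ++ [i2 ++ "\"" ++ item ++ "\",\n"])

def format_nonterm_alt (rule : String) (act : String) (depth : Int) : String :=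
  let i1 := strRep "  " (depth+1)
  let i2 := strRep "  " (depth+2)
  let i3 := strRep "  " (depth+3)
  let frags := bLoop (PySem.Str.split₀ rule) i2 i3 false []
    [strRep " " (depth*2) ++ "{\n" ++ i1 ++ "rule: [\n"]
  PySem.Str.join ""
    (frags ++ [i1 ++ "],\n" ++ i1 ++ "action: " ++ act ++ "\n" ++ strRep "  " depth ++ "}"])

-- ===== PRECONDITION & SPEC =====
def Spec_format_nonterm (rule : String) (act : String) (depth : Int) (out : String) : Prop := out = format_nonterm_alt rule act depth
instance (rule : String) (act : String) (depth : Int) (out : String) : Decidable (Spec_format_nonterm rule act depth out) := by unfold Spec_format_nonterm; infer_instance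

-- ===== CLAIM (what is proved, stated in full; the proofs are below) =====
def Claim_equal_format_nonterm : Prop := ∀ (rule : String) (act : String) (depth : Int), Dom_format_nonterm rule act depth → Spec_format_nonterm rule act depth (format_nonterm rule act depth)

-- ===== LEMMAS AND PROOFS =====

theorem flatten_intersperse_nil {α : Type} (l : List (List α)) :
    (List.intersperse [] l).flatten = l.flatten := by
  induction l with
  | nil => rfl
  | cons a t ih =>
    cases t with
    | nil => rfl
    | cons b t2 =>
      simp only [List.intersperse, List.flatten_cons] at *
      simp_all

theorem join_empty_cons (a : String) (l : List String) :
    PySem.Str.join "" (a :: l) = a ++ PySem.Str.join "" l := by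
  simp [PySem.Str.join, PySem.Chars.join, List.intercalate, flatten_intersperse_nil]

theorem join_empty_nil : PySem.Str.join "" ([] : List String) = "" := by
  simp [PySem.Str.join, PySem.Chars.join, List.intercalate]

theorem join_empty_singleton (s : String) : PySem.Str.join "" [s] = s := by
  simp [PySem.Str.join, PySem.Chars.join, List.intercalate]

theorem join_empty_append (l1 l2 : List String) :
    PySem.Str.join "" (l1 ++ l2) = PySem.Str.join "" l1 ++ PySem.Str.join "" l2 := by
  induction l1 with
  | nil => simp [join_empty_nil]
  | cons a t ih =>
    simp only [List.cons_append, join_empty_cons, ih, String.append_assoc]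

theorem parseRuleLoop_acc (items : List String) (parsed : List PEntry) (g : Bool) (cur : List String) :
    parseRuleLoop items parsed g cur = parsed ++ parseRuleLoop items [] g cur := by
  induction items generalizing parsed g cur with
  | nil => simp [parseRuleLoop]
  | cons item rest ih =>
    simp only [parseRuleLoop]
    split_ifs <;>
      first
        | exact ih _ _ _
        | (rw [ih _ _ _]; (conv_rhs => rw [ih _ _ _]); simp)

theorem fmtLoop_acc (parsed : List PEntry) (depth : Int) (s : String) :
    fmtLoop parsed depth s = s ++ fmtLoop parsed depth "" := by
  induction parsed generalizing s with
  | nil => simp [fmtLoop]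
  | cons e rest ih =>
    cases e <;>
      (simp only [fmtLoop]; rw [ih _]; (conv_rhs => rw [ih _]); simp [String.append_assoc])

theorem bLoop_acc (items : List String) (i2 i3 : String) (g : Bool) (buf frags : List String) :
    bLoop items i2 i3 g buf frags = frags ++ bLoop items i2 i3 g buf [] := by
  induction items generalizing g buf frags with
  | nil => simp [bLoop]
  | cons item rest ih =>
    simp only [bLoop]
    split_ifs <;>
      first
        | exact ih _ _ _
        | (rw [ih _ _ _]; (conv_rhs => rw [ih _ _ _]); simp)

-- the fused loop produces exactly the concatenation A's format loop produces over the parsed list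
theorem main_loop (items : List String) (depth : Int) (g : Bool) (buf : List String) :
    PySem.Str.join "" (bLoop items (strRep "  " (depth+2)) (strRep "  " (depth+3)) g buf []) =
      fmtLoop (parseRuleLoop items [] g buf) depth "" := by
  induction items generalizing g buf with
  | nil => simp [bLoop, parseRuleLoop, fmtLoop, join_empty_nil]
  | cons item rest ih =>
    simp only [bLoop, parseRuleLoop]
    split_ifs <;>
      first
        | exact ih _ _
        | (rw [bLoop_acc, join_empty_append, ih _ _]
           conv_rhs => rw [parseRuleLoop_acc]
           simp only [List.nil_append, List.singleton_append, fmtLoop, join_empty_singleton]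
           conv_rhs => rw [fmtLoop_acc]
           simp [String.append_assoc])

-- ===== VERDICT (by name: the statement is the Claim_ definition above) =====
theorem format_nonterm_spec : Claim_equal_format_nonterm := by
  intro rule act depth _
  unfold Spec_format_nonterm format_nonterm format_nonterm_alt parse_rule
  dsimp only
  rw [bLoop_acc, join_empty_append, join_empty_append, main_loop]
  rw [join_empty_singleton, join_empty_singleton]
  rw [fmtLoop_acc]
  simp [String.append_assoc]
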